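-- pv_equiv track=rewrite | github.com/bozzfozz/harmony | app/api/middleware.py | _is_allowlisted
-- ===== SOURCE A (Python) =====
-- def _is_allowlisted(path: str, allowlist: tuple[str, ...]) -> bool:
--     for prefix in allowlist:
--         if not prefix:
--             continue
--         if prefix == "/" and path == "/":
--             return True
--         if path == prefix or path.startswith(f"{prefix}/"):
--             return True
--     return False
-- ===== SOURCE B (Python) =====
-- def _is_allowlisted(path: str, allowlist) -> bool:
--     # candidate prefixes of path that could match: path itself and every
--     # truncation of path at a '/' character
--     candidates = {path}
--     for i, ch in enumerate(path):
--         if ch == '/':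
--             candidates.add(path[:i])
--     allowed = {p for p in allowlist if p}
--     return bool(candidates & allowed)
-- ===== Notes on version B (the rewrite author's own statement) =====
-- stated objective: alternative
-- what changed: Instead of scanning the allowlist and testing each entry against the path with string comparisons, B builds the set of all slash-truncations of the path (plus the path itself) in one pass and intersects it with the set of nonempty allowlist entries, replacing per-entry startswith scans by hash-set lookups.
import Mathlib
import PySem

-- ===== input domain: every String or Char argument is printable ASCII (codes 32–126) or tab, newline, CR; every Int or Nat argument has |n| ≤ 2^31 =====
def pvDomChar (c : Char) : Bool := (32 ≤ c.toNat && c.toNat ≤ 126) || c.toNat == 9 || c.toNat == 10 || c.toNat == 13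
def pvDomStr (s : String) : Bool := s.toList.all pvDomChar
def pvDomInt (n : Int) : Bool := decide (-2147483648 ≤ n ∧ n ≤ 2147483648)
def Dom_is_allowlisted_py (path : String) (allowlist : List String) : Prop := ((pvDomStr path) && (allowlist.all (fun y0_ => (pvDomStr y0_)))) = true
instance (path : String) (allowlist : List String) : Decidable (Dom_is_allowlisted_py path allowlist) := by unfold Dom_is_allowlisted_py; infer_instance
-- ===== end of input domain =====

-- B replaces A's per-entry prefix tests by one set intersection: the set of
-- slash-truncations of the path (plus the path) against the set of nonempty
-- allowlist entries; same cost class, different decomposition (objective: alternative).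


-- ===== PORT A =====
-- A's loop over the allowlist, working on char lists (strings are ported via toList;
-- f"{prefix}/" is q ++ ['/'], path.startswith is PySem.Chars.startswith — exact on ASCII)
def pvALoop (pl : List Char) : List (List Char) → Bool
  | [] => false
  | q :: rest =>
    if q = [] then pvALoop pl rest
    else if q = ['/'] ∧ pl = ['/'] then true
    else if pl = q ∨ PySem.Chars.startswith pl (q ++ ['/']) then true
    else pvALoop pl rest

def is_allowlisted_py (path : String) (allowlist : List String) : Bool :=
  pvALoop path.toList (allowlist.map String.toList)

-- ===== PORT B =====
-- candidates = {path} ∪ {path[:i] | path[i] == '/'}, built by the enumerate loop of Source B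
def pvBCandidates (pl : List Char) : PySem.Set (List Char) :=
  (PySem.List.enumerate pl 0).foldl
    (fun s p => if p.2 = '/' then PySem.Set.add s (PySem.List.slice pl none (some p.1)) else s)
    (PySem.Set.ofList [pl])

def is_allowlisted_py_alt (path : String) (allowlist : List String) : Bool :=
  let candidates := pvBCandidates path.toList
  let allowed : PySem.Set (List Char) :=
    PySem.Set.ofList (((allowlist.map String.toList).filter (fun p => p ≠ [])))
  !(PySem.Set.inter candidates allowed).isEmpty

-- ===== PRECONDITION & SPEC =====
def Spec_is_allowlisted_py (path : String) (allowlist : List String) (out : Bool) : Prop := out = is_allowlisted_py_alt path allowlist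
instance (path : String) (allowlist : List String) (out : Bool) : Decidable (Spec_is_allowlisted_py path allowlist out) := by unfold Spec_is_allowlisted_py; infer_instance

-- ===== CLAIM (what is proved, stated in full; the proofs are below) =====
def Claim_equal_is_allowlisted_py : Prop := ∀ (path : String) (allowlist : List String), Dom_is_allowlisted_py path allowlist → Spec_is_allowlisted_py path allowlist (is_allowlisted_py path allowlist)

-- ===== LEMMAS AND PROOFS =====

-- membership in the candidate-building fold
theorem pv_mem_foldl_add {α : Type} [BEq α] [LawfulBEq α]
    (l : List (Int × Char)) (f : Int × Char → α) (y : α) :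
    ∀ s0 : PySem.Set α,
      (y ∈ l.foldl (fun s p => if p.2 = '/' then PySem.Set.add s (f p) else s) s0
       ↔ y ∈ s0 ∨ ∃ p ∈ l, p.2 = '/' ∧ y = f p) := by
  induction l with
  | nil => simp
  | cons p l ih =>
    intro s0
    by_cases h : p.2 = '/'
    · simp only [List.foldl_cons, h, if_true, PySem.Set.mem_add, ih, List.mem_cons]
      constructor
      · rintro (⟨hy | hy⟩ | ⟨q, hq, hq2, hy⟩)
        · exact Or.inl hy
        · exact Or.inr ⟨p, Or.inl rfl, h, hy⟩
        · exact Or.inr ⟨q, Or.inr hq, hq2, hy⟩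
      · rintro (hy | ⟨q, (rfl | hq), hq2, hy⟩)
        · exact Or.inl (Or.inl hy)
        · exact Or.inl (Or.inr hy)
        · exact Or.inr ⟨q, hq, hq2, hy⟩
    · simp only [List.foldl_cons, if_neg h, ih, List.mem_cons]
      constructor
      · rintro (hy | ⟨q, hq, hq2, hy⟩)
        · exact Or.inl hy
        · exact Or.inr ⟨q, Or.inr hq, hq2, hy⟩
      · rintro (hy | ⟨q, (rfl | hq), hq2, hy⟩)
        · exact Or.inl hy
        · exact absurd hq2 h
        · exact Or.inr ⟨q, hq, hq2, hy⟩

theorem pv_mem_candidates (pl : List Char) (y : List Char) :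
    y ∈ pvBCandidates pl ↔
      y = pl ∨ ∃ k, ∃ hk : k < pl.length, pl[k] = '/' ∧ y = pl.take k := by
  unfold pvBCandidates
  rw [pv_mem_foldl_add]
  simp only [PySem.Set.mem_ofList, List.mem_singleton, PySem.List.mem_enumerate_iff]
  constructor
  · rintro (hy | ⟨p, ⟨k, hk, rfl⟩, h2, hy⟩)
    · exact Or.inl hy
    · refine Or.inr ⟨k, hk, h2, ?_⟩
      rw [hy]
      simp [PySem.List.slice_to_natCast]
  · rintro (hy | ⟨k, hk, h2, hy⟩)
    · exact Or.inl hy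
    · refine Or.inr ⟨((0 : Int) + k, pl[k]), ⟨k, hk, rfl⟩, h2, ?_⟩
      rw [hy]
      have := PySem.List.slice_to_natCast pl k
      simp only [zero_add]
      rw [this]

-- A's startswith test for a slash-terminated prefix names exactly a slash-truncation
theorem pv_prefix_slash_iff (pl q : List Char) :
    (q ++ ['/']) <+: pl ↔ ∃ k, ∃ hk : k < pl.length, pl[k] = '/' ∧ q = pl.take k := by
  constructor
  · rintro ⟨t, ht⟩
    subst ht
    refine ⟨q.length, by simp, by simp, by simp⟩
  · rintro ⟨k, hk, hsl, rfl⟩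
    refine ⟨pl.drop (k + 1), ?_⟩
    have h1 : pl.take (k + 1) = pl.take k ++ [pl[k]] := List.take_succ_eq_append_getElem hk
    calc pl.take k ++ ['/'] ++ pl.drop (k + 1)
        = pl.take (k + 1) ++ pl.drop (k + 1) := by rw [h1, hsl]
      _ = pl := List.take_append_drop _ _

-- characterization of A's loop
theorem pv_aLoop_iff (pl : List Char) (qs : List (List Char)) :
    pvALoop pl qs = true ↔ ∃ q ∈ qs, q ≠ [] ∧ (pl = q ∨ (q ++ ['/']) <+: pl) := by
  induction qs with
  | nil => simp [pvALoop]
  | cons q rest ih =>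
    unfold pvALoop
    by_cases h0 : q = []
    · simp only [if_pos h0, ih, List.mem_cons]
      constructor
      · rintro ⟨r, hr, h⟩; exact ⟨r, Or.inr hr, h⟩
      · rintro ⟨r, (rfl | hr), hne, h⟩
        · exact absurd h0 hne
        · exact ⟨r, hr, hne, h⟩
    · rw [if_neg h0]
      by_cases h1 : q = ['/'] ∧ pl = ['/']
      · simp only [if_pos h1]
        constructor
        · intro _
          exact ⟨q, List.mem_cons_self .., h0, Or.inl (h1.2.trans h1.1.symm)⟩
        · intro _; trivial
      · rw [if_neg h1]
        by_cases h2 : pl = q ∨ PySem.Chars.startswith pl (q ++ ['/'])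
        · simp only [if_pos h2, true_iff]
          refine ⟨q, List.mem_cons_self .., h0, ?_⟩
          rcases h2 with h2 | h2
          · exact Or.inl h2
          · exact Or.inr ((PySem.Chars.startswith_iff _ _).mp h2)
        · simp only [if_neg h2, ih, List.mem_cons]
          constructor
          · rintro ⟨r, hr, h⟩; exact ⟨r, Or.inr hr, h⟩
          · rintro ⟨r, (rfl | hr), hne, h⟩
            · exfalso; apply h2
              rcases h with h | h
              · exact Or.inl h
              · exact Or.inr ((PySem.Chars.startswith_iff _ _).mpr h)
            · exact ⟨r, hr, hne, h⟩

-- ===== VERDICT (by name: the statement is the Claim_ definition above) =====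
theorem is_allowlisted_py_spec : Claim_equal_is_allowlisted_py := by
  intro path allowlist _
  unfold Spec_is_allowlisted_py
  unfold is_allowlisted_py is_allowlisted_py_alt
  set pl := path.toList with hpl
  set qs := allowlist.map String.toList with hqs
  simp only []
  rw [Bool.eq_iff_iff, pv_aLoop_iff]
  rw [Bool.not_eq_true', Bool.eq_false_iff, Ne, List.isEmpty_iff]
  constructor
  · rintro ⟨q, hq, hne, h⟩
    have hq' : q ∈ PySem.Set.inter (pvBCandidates pl)
        (PySem.Set.ofList (qs.filter (fun p => p ≠ []))) := by
      rw [PySem.Set.mem_inter, pv_mem_candidates, PySem.Set.mem_ofList, List.mem_filter]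
      rcases h with rfl | h
      · exact ⟨Or.inl rfl, hq, by simp [hne]⟩
      · exact ⟨Or.inr ((pv_prefix_slash_iff pl q).mp h), hq, by simp [hne]⟩
    exact List.ne_nil_of_mem hq'
  · intro hne
    obtain ⟨y, hy⟩ := List.exists_mem_of_ne_nil _ hne
    rw [PySem.Set.mem_inter, pv_mem_candidates, PySem.Set.mem_ofList, List.mem_filter] at hy
    obtain ⟨hc, hmem, hney⟩ := hy
    refine ⟨y, hmem, by simpa using hney, ?_⟩
    rcases hc with rfl | hc
    · exact Or.inl rfl
    · exact Or.inr ((pv_prefix_slash_iff pl y).mpr hc)
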